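-- pv_equiv track=rewrite | github.com/xpessoles/Informatique | P_05_AlgorithmiqueProgrammation/02_Piles/piles_2016/programme/TD2_piles_tasDeSable.py | taille_pile
-- ===== SOURCE A (Python) =====
-- def creer_pile():
--     return []
--
-- def empiler(pile,element):
--     return pile.append(element)
--
-- def depiler(pile):
--     return pile.pop()
--
-- def est_vide(pile):
--     return len(pile)==0
--
-- def taille_pile(pile):
--     pile_a_remplir=creer_pile()
--     i=0
--     while not est_vide(pile):
--         empiler(pile_a_remplir,depiler(pile))
--         i+=1
--     while not est_vide(pile_a_remplir): #boucle qui reforme la pile initiale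
--         empiler(pile,depiler(pile_a_remplir))
--     return (i) #préciser la question pile est modifiée (effet de bord)
-- ===== SOURCE B (Python) =====
-- def taille_pile(pile):
--     # closed form: a Python list knows its length; no transfer/restore loops needed
--     return len(pile)
-- ===== Notes on version B (the rewrite author's own statement) =====
-- stated objective: faster
-- what changed: Replaces A's two transfer-and-restore while loops over an auxiliary stack with the closed form len(pile), removing all mutation.
import Mathlib
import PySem

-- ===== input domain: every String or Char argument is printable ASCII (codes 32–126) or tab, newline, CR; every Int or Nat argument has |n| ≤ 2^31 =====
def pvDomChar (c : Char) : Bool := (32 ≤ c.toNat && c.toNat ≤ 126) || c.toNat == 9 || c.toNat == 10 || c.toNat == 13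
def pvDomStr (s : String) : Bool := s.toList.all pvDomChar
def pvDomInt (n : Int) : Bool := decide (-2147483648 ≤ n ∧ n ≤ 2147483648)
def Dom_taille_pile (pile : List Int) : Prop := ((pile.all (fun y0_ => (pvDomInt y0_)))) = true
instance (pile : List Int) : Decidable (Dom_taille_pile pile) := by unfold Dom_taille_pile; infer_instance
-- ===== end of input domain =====

-- B replaces A's two transfer-and-restore while loops with the closed form len(pile) (O(1),
-- no mutation). Python A mutates `pile` transiently but restores it; the equivalence proved
-- here is about the RETURN value only.

-- ===== PORT A =====
-- first while loop: pop from pile, push onto pile_a_remplir, i += 1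
def pvLoopA1 (pile pile_a_remplir : List Int) (i : Int) : List Int × Int :=
  if pile.isEmpty then (pile_a_remplir, i)
  else pvLoopA1 pile.dropLast (pile_a_remplir ++ [pile.getLast!]) (i + 1)
termination_by pile.length
decreasing_by
  simp_all [List.isEmpty_iff]
  exact List.length_pos_iff.mpr (by assumption)

-- second while loop: pop from pile_a_remplir, push back onto pile (restores the stack)
def pvLoopA2 (pile_a_remplir pile : List Int) : List Int :=
  if pile_a_remplir.isEmpty then pile
  else pvLoopA2 pile_a_remplir.dropLast (pile ++ [pile_a_remplir.getLast!])
termination_by pile_a_remplir.length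
decreasing_by
  simp_all [List.isEmpty_iff]
  exact List.length_pos_iff.mpr (by assumption)

def taille_pile (pile : List Int) : Int :=
  let r := pvLoopA1 pile [] 0
  let _pile_restored := pvLoopA2 r.1 []  -- side-effect loop rebuilding pile; value unused
  r.2

-- ===== PORT B =====
def taille_pile_alt (pile : List Int) : Int :=
  pile.length

-- ===== PRECONDITION & SPEC =====
def Spec_taille_pile (pile : List Int) (out : Int) : Prop := out = taille_pile_alt pile
instance (pile : List Int) (out : Int) : Decidable (Spec_taille_pile pile out) := by unfold Spec_taille_pile; infer_instance

-- ===== CLAIM (what is proved, stated in full; the proofs are below) =====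
def Claim_equal_taille_pile : Prop := ∀ (pile : List Int), Dom_taille_pile pile → Spec_taille_pile pile (taille_pile pile)

-- ===== LEMMAS AND PROOFS =====
theorem pvLoopA1_count (pile : List Int) : ∀ (acc : List Int) (i : Int),
    (pvLoopA1 pile acc i).2 = i + pile.length := by
  induction pile using List.reverseRecOn with
  | nil => intro acc i; simp [pvLoopA1.eq_def]
  | append_singleton xs x ih =>
      intro acc i
      rw [pvLoopA1.eq_def]
      simp [List.dropLast_concat, ih]
      omega

-- ===== VERDICT (by name: the statement is the Claim_ definition above) =====
theorem taille_pile_spec : Claim_equal_taille_pile := by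
  intro pile _
  unfold Spec_taille_pile taille_pile
  rw [pvLoopA1_count]
  simp [taille_pile_alt]
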